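-- pv_equiv track=rewrite | github.com/yuta1331/watermark | anonymizer.py | freq_list
-- ===== SOURCE A (Python) =====
-- from copy import deepcopy
--
-- def quasi_row(row, sensitive):
--     if sensitive + 1 < len(row):
--         return row[:sensitive] + row[sensitive + 1:]
--     return row[:sensitive]
--
-- def quasi_list(datalist, sensitive):
--     if sensitive == None: return deepcopy(datalist)
--     quasilist = list()
--     for i in range(len(datalist)):
--         quasilist.append(quasi_row(datalist[i], sensitive))
--     return quasilist
--
-- def freq_list(datalist, sensitive): # calculate the frequency of each q*-block
--                                     # 最後尾要素にfrequency
--     quasilist = quasi_list(datalist, sensitive)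
--     i = 0
--     while i < len(quasilist):
--         quasilist[i].append(1)
--         j = i + 1
--         while j < len(quasilist):
--             if quasilist[i][:-1] == quasilist[j]:
--                 quasilist[i][-1] += 1 # frequency increment
--                 del quasilist[j]
--             else:
--                 j += 1
--         i += 1
--     return quasilist
-- ===== SOURCE B (Python) =====
-- from copy import deepcopy
--
-- def quasi_row(row, sensitive):
--     if sensitive + 1 < len(row):
--         return row[:sensitive] + row[sensitive + 1:]
--     return row[:sensitive]
--
-- def quasi_list(datalist, sensitive):
--     if sensitive == None: return deepcopy(datalist)
--     quasilist = list()
--     for i in range(len(datalist)):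
--         quasilist.append(quasi_row(datalist[i], sensitive))
--     return quasilist
--
-- def freq_list(datalist, sensitive):
--     quasilist = quasi_list(datalist, sensitive)
--     table = {}
--     for row in quasilist:
--         t = tuple(row)
--         table[t] = table.get(t, 0) + 1
--     seen = set()
--     result = []
--     for row in quasilist:
--         t = tuple(row)
--         if t not in seen:
--             seen.add(t)
--             result.append(row + [table[t]])
--     return result
-- ===== Notes on version B (the rewrite author's own statement) =====
-- stated objective: faster
-- what changed: Replaces A's nested compare-and-delete rescan over a mutated list by one counting pass building a frequency dict plus one distinct-emitting pass with a seen set.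
import Mathlib
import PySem

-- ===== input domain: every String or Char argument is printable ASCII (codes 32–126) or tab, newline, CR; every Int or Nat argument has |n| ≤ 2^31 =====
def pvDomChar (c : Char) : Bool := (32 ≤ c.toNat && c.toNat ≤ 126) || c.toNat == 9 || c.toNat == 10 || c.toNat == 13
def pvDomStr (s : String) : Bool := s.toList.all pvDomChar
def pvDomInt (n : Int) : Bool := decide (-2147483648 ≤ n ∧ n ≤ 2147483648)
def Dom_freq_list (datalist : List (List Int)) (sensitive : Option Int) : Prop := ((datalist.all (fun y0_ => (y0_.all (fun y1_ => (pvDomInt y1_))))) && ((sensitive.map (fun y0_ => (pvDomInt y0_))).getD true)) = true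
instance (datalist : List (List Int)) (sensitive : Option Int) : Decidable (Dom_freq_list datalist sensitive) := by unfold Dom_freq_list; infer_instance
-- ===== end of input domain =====

-- B replaces A's quadratic nested compare-and-delete rescan by one counting pass
-- (frequency dict) plus one distinct-emitting pass with a seen set (objective: faster).
-- A mutates its local quasilist only (deepcopy when sensitive is None); the caller's
-- datalist is never mutated by either version, so return-value equivalence is the whole story.

-- ===== PORT A =====
-- quasi_row(row, sensitive) for an actual int sensitive (quasi_list short-circuits None)
def quasiRow (row : List Int) (s : Int) : List Int :=
  if s + 1 < (row.length : Int) then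
    PySem.List.slice row none (some s) ++ PySem.List.slice row (some (s + 1)) none
  else
    PySem.List.slice row none (some s)

-- quasi_list: deepcopy on None, else the index loop appending quasi_row(datalist[i])
def quasiList (datalist : List (List Int)) (sensitive : Option Int) : List (List Int) :=
  match sensitive with
  | none => datalist
  | some s =>
    (PySem.List.pyRange 0 (datalist.length : Int) 1).foldl
      (fun acc i => acc ++ [quasiRow (PySem.List.pyGetD datalist i []) s]) []

-- inner while loop of A: cur is quasilist[i] (count already appended); scans the rest,
-- on a match does cur[-1] += 1 (as cur[:-1] ++ [cur[-1]+1]) and deletes the row, else keeps it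
def freqInner (cur : List Int) : List (List Int) → List Int × List (List Int)
  | [] => (cur, [])
  | y :: ys =>
    if PySem.List.slice cur none (some (-1)) == y then
      freqInner (PySem.List.slice cur none (some (-1)) ++ [PySem.List.pyGetD cur (-1) 0 + 1]) ys
    else
      let r := freqInner cur ys
      (r.1, y :: r.2)

theorem freqInner_len_le (cur : List Int) (l : List (List Int)) :
    (freqInner cur l).2.length ≤ l.length := by
  induction l generalizing cur with
  | nil => simp [freqInner]
  | cons y ys ih =>
    simp only [freqInner]
    split
    · exact le_trans (ih _) (Nat.le_succ _)
    · simpa using ih cur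

-- outer while loop of A: appends 1 to quasilist[i], runs the inner scan, moves on
def freqOuter : List (List Int) → List (List Int)
  | [] => []
  | x :: rest =>
    let r := freqInner (x ++ [1]) rest
    r.1 :: freqOuter r.2
termination_by l => l.length
decreasing_by
  have := freqInner_len_le (x ++ [1]) rest
  simp; omega

def freq_list (datalist : List (List Int)) (sensitive : Option Int) : List (List Int) :=
  freqOuter (quasiList datalist sensitive)

-- ===== PORT B =====
-- second pass of B: emit row ++ [table[row]] at each first occurrence, tracking a seen set
def emitLoop (table : PySem.Dict (List Int) Int) (seen : PySem.Set (List Int)) :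
    List (List Int) → List (List Int)
  | [] => []
  | x :: rest =>
    if PySem.Set.contains seen x then emitLoop table seen rest
    else (x ++ [table.getD x 0]) :: emitLoop table (PySem.Set.add seen x) rest

def freq_list_alt (datalist : List (List Int)) (sensitive : Option Int) : List (List Int) :=
  let quasilist := quasiList datalist sensitive
  -- first pass: table[t] = table.get(t, 0) + 1 over all quasi rows
  let table := quasilist.foldl (fun d x => d.insert x (d.getD x 0 + 1)) PySem.Dict.empty
  emitLoop table PySem.Set.empty quasilist

-- ===== PRECONDITION & SPEC =====
def Spec_freq_list (datalist : List (List Int)) (sensitive : Option Int) (out : List (List Int)) : Prop := out = freq_list_alt datalist sensitive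
instance (datalist : List (List Int)) (sensitive : Option Int) (out : List (List Int)) : Decidable (Spec_freq_list datalist sensitive out) := by unfold Spec_freq_list; infer_instance

-- ===== CLAIM (what is proved, stated in full; the proofs are below) =====
def Claim_equal_freq_list : Prop := ∀ (datalist : List (List Int)) (sensitive : Option Int), Dom_freq_list datalist sensitive → Spec_freq_list datalist sensitive (freq_list datalist sensitive)

-- ===== LEMMAS AND PROOFS =====

theorem freqOuter_cons (x : List Int) (rest : List (List Int)) :
    freqOuter (x :: rest) = (freqInner (x ++ [1]) rest).1 :: freqOuter (freqInner (x ++ [1]) rest).2 := by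
  rw [freqOuter]

theorem set_contains_false (s : PySem.Set (List Int)) (y : List Int) (h : y ∉ s) :
    PySem.Set.contains s y = false := by
  rw [Bool.eq_false_iff]
  intro hc
  exact h ((PySem.Set.contains_iff s y).mp hc)

theorem count_filter_of_pos (p : List Int → Bool) (x : List Int) (hp : p x = true) :
    ∀ l : List (List Int), (l.filter p).count x = l.count x := by
  intro l
  induction l with
  | nil => rfl
  | cons y ys ih =>
    by_cases hxy : x = y
    · subst hxy
      simp [hp, ih]
    · rcases hpy : p y with _ | _ <;>
        simp [hpy, ih, Ne.symm hxy]

-- the inner scan returns the row with the count bumped by the number of matches,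
-- and the survivors (rows different from x)
theorem freqInner_spec (l : List (List Int)) (x : List Int) (c : Int) :
    freqInner (x ++ [c]) l = (x ++ [c + (l.count x : Int)], l.filter (fun y => !(x == y))) := by
  induction l generalizing c with
  | nil => simp [freqInner]
  | cons y ys ih =>
    simp only [freqInner, PySem.List.slice_to_neg_one, List.dropLast_concat,
      PySem.List.pyGetD_neg_one_append_singleton]
    by_cases h : x = y
    · subst h
      simp [ih, List.count_cons_self]
      ring_nf
    · simp [h, ih c, Ne.symm h]

-- the emitting pass equals A's outer loop on the not-yet-seen rows, whenever the table
-- holds the multiplicity of every unseen row in the remaining list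
theorem emitLoop_spec (l : List (List Int)) (table : PySem.Dict (List Int) Int)
    (seen : PySem.Set (List Int))
    (h : ∀ y, PySem.Set.contains seen y = false → table.getD y 0 = (l.count y : Int)) :
    emitLoop table seen l = freqOuter (l.filter (fun y => !PySem.Set.contains seen y)) := by
  induction l generalizing seen with
  | nil => simp [emitLoop, freqOuter]
  | cons x rest ih =>
    simp only [emitLoop]
    by_cases hxm : x ∈ seen
    · rw [if_pos ((PySem.Set.contains_iff seen x).mpr hxm)]
      have hfe : (x :: rest).filter (fun y => !PySem.Set.contains seen y)
          = rest.filter (fun y => !PySem.Set.contains seen y) := by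
        simp [hxm]
      rw [hfe]
      refine ih seen (fun y hy => ?_)
      have hyx : y ≠ x := by
        intro he; subst he
        rw [(PySem.Set.contains_iff seen y).mpr hxm] at hy; cases hy
      rw [h y hy]
      simp [Ne.symm hyx]
    · rw [if_neg (by rw [set_contains_false seen x hxm]; simp)]
      have hfe : (x :: rest).filter (fun y => !PySem.Set.contains seen y)
          = x :: rest.filter (fun y => !PySem.Set.contains seen y) := by
        simp [hxm]
      rw [hfe, freqOuter_cons]
      have hcount : (rest.filter (fun y => !PySem.Set.contains seen y)).count x = rest.count x :=
        count_filter_of_pos _ x (by rw [set_contains_false seen x hxm]; rfl) rest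
      have htab : table.getD x 0
          = 1 + ((rest.filter (fun y => !PySem.Set.contains seen y)).count x : Int) := by
        rw [h x (set_contains_false seen x hxm), hcount, List.count_cons_self]
        push_cast; ring
      rw [htab, freqInner_spec]
      congr 1
      rw [ih (PySem.Set.add seen x) (fun y hy => ?_), List.filter_filter]
      · congr 1
        apply List.filter_congr
        intro y _
        by_cases hyx : y = x
        · subst hyx
          rw [(PySem.Set.contains_iff _ y).mpr (by rw [PySem.Set.mem_add]; right; rfl)]
          simp only [beq_self_eq_true, Bool.not_true, Bool.false_and]
        · have hm : PySem.Set.contains (PySem.Set.add seen x) y = PySem.Set.contains seen y := by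
            by_cases hys : y ∈ seen
            · rw [(PySem.Set.contains_iff _ y).mpr (by rw [PySem.Set.mem_add]; left; exact hys),
                  (PySem.Set.contains_iff seen y).mpr hys]
            · rw [set_contains_false seen y hys, set_contains_false _ y ?_]
              rw [PySem.Set.mem_add]
              rintro (h1 | h2)
              · exact hys h1
              · exact hyx h2
          rw [hm, show (x == y) = false from beq_eq_false_iff_ne.mpr (Ne.symm hyx)]
          simp
      · have hys : y ∉ seen := fun hmem => by
          rw [(PySem.Set.contains_iff _ y).mpr (by rw [PySem.Set.mem_add]; left; exact hmem)] at hy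
          cases hy
        have hyx : y ≠ x := fun he => by
          subst he
          rw [(PySem.Set.contains_iff _ y).mpr (by rw [PySem.Set.mem_add]; right; rfl)] at hy
          cases hy
        rw [h y (set_contains_false seen y hys)]
        simp [Ne.symm hyx]

-- ===== VERDICT (by name: the statement is the Claim_ definition above) =====
theorem freq_list_spec : Claim_equal_freq_list := by
  intro datalist sensitive _
  show freq_list datalist sensitive = freq_list_alt datalist sensitive
  show freqOuter (quasiList datalist sensitive)
      = emitLoop ((quasiList datalist sensitive).foldl (fun d x => d.insert x (d.getD x 0 + 1)) PySem.Dict.empty)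
          PySem.Set.empty (quasiList datalist sensitive)
  rw [PySem.Dict.foldl_insert_getD_add_one_eq_counter]
  rw [emitLoop_spec]
  · simp [PySem.Set.empty, PySem.Set.contains]
  · intro y _
    exact PySem.Dict.getD_counter _ _
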